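-- pv_equiv track=rewrite | github.com/marbre/TheRock | build_tools/github_actions/external_repo_project_maps.py | get_changed_subtrees
-- ===== SOURCE A (Python) =====
-- from typing import Iterable, Optional, Set
--
-- def get_changed_subtrees(
--     modified_paths: list[str], subtree_to_project_map: dict
-- ) -> Set[str]:
--     """Returns subtree roots that were touched by modified paths."""
--     changed_subtrees: Set[str] = set()
--     for path in modified_paths:
--         for subtree in subtree_to_project_map.keys():
--             if path.startswith(subtree + "/") or path == subtree:
--                 changed_subtrees.add(subtree)
--                 break
--     return changed_subtrees
-- ===== SOURCE B (Python) =====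
-- def get_changed_subtrees(modified_paths, subtree_to_project_map):
--     """Returns subtree roots that were touched by modified paths.
--
--     Instead of scanning every subtree per path, index the subtrees by their
--     dict position once and, for each path, test only the path's own ancestor
--     prefixes (one per '/') plus the path itself, keeping the earliest-indexed
--     match -- the same subtree A's first-match scan picks.
--     """
--     order = {}
--     for i, subtree in enumerate(subtree_to_project_map):
--         if subtree not in order:
--             order[subtree] = i
--     changed = set()
--     for path in modified_paths:
--         best = None
--         for j, ch in enumerate(path):
--             if ch == "/":
--                 prefix = path[:j]
--                 if prefix in order and (best is None or order[prefix] < order[best]):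
--                     best = prefix
--         if path in order and (best is None or order[path] < order[best]):
--             best = path
--         if best is not None:
--             changed.add(best)
--     return changed
-- ===== Notes on version B (the rewrite author's own statement) =====
-- stated objective: faster
-- what changed: Instead of scanning every subtree key per modified path (first match wins), B builds a subtree-to-position index once and per path checks only the path's own ancestor prefixes (one per '/') plus the path itself, keeping the earliest-indexed match.
import Mathlib
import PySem

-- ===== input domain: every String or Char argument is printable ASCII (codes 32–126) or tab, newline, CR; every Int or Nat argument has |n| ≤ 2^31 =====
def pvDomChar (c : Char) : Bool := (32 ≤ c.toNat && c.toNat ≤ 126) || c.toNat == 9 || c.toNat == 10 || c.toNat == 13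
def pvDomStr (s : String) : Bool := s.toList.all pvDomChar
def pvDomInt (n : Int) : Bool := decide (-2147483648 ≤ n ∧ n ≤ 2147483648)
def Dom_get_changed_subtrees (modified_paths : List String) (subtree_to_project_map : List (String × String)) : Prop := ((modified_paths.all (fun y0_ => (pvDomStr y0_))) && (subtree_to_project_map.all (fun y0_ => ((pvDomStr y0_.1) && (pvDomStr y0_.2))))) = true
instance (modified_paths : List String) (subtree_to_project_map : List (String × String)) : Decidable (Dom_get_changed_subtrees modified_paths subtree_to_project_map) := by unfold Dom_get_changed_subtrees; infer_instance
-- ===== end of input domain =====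

-- B replaces A's per-path scan over ALL subtree keys by a one-time subtree→position index and,
-- per path, a scan over the path's own ancestor prefixes, keeping the earliest-indexed match.

-- ===== PORT A =====
def get_changed_subtrees (modified_paths : List String) (subtree_to_project_map : List (String × String)) : List String :=
  modified_paths.foldl
    (fun changed_subtrees path =>
      -- inner 'for subtree in ….keys(): if match: add; break' = first matching key, if any
      match (PySem.Dict.ofList subtree_to_project_map).keys.find?
          (fun subtree => PySem.Str.startswith path (subtree ++ "/") || path == subtree) with
      | some subtree => PySem.Set.add changed_subtrees subtree
      | none => changed_subtrees)
    (PySem.Set.empty : PySem.Set String)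

-- ===== PORT B =====
-- 'cand in order and (best is None or order[cand] < order[best]): best = cand'
def pvBestStep (order : PySem.Dict String Int) (best : Option String) (cand : String) : Option String :=
  if order.contains cand then
    match best with
    | none => some cand
    | some b => if order.getD cand 0 < order.getD b 0 then some cand else best
  else best

-- 'for i, subtree in enumerate(subtree_to_project_map): if subtree not in order: order[subtree] = i'
def pvOrder (subtree_to_project_map : List (String × String)) : PySem.Dict String Int :=
  (PySem.List.enumerate (PySem.Dict.ofList subtree_to_project_map).keys).foldl
    (fun d p => if d.contains p.2 then d else d.insert p.2 p.1) PySem.Dict.empty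

def get_changed_subtrees_alt (modified_paths : List String) (subtree_to_project_map : List (String × String)) : List String :=
  let order := pvOrder subtree_to_project_map
  modified_paths.foldl
    (fun changed path =>
      -- 'for j, ch in enumerate(path): if ch == "/": consider prefix path[:j]'
      let best := (PySem.List.enumerate path.toList).foldl
        (fun best p =>
          if p.2 == '/' then pvBestStep order best (PySem.Str.slice path none (some p.1))
          else best) none
      -- then consider the whole path; 'if best is not None: changed.add(best)'
      match pvBestStep order best path with
      | some b => PySem.Set.add changed b
      | none => changed)
    (PySem.Set.empty : PySem.Set String)

-- ===== PRECONDITION & SPEC =====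
def Spec_get_changed_subtrees (modified_paths : List String) (subtree_to_project_map : List (String × String)) (out : List String) : Prop := out = get_changed_subtrees_alt modified_paths subtree_to_project_map
instance (modified_paths : List String) (subtree_to_project_map : List (String × String)) (out : List String) : Decidable (Spec_get_changed_subtrees modified_paths subtree_to_project_map out) := by unfold Spec_get_changed_subtrees; infer_instance

-- ===== CLAIM (what is proved, stated in full; the proofs are below) =====
def Claim_equal_get_changed_subtrees : Prop := ∀ (modified_paths : List String) (subtree_to_project_map : List (String × String)), Dom_get_changed_subtrees modified_paths subtree_to_project_map → Spec_get_changed_subtrees modified_paths subtree_to_project_map (get_changed_subtrees modified_paths subtree_to_project_map)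

-- ===== LEMMAS AND PROOFS =====

-- the candidate list B effectively scans: one ancestor prefix per '/', plus the path itself
def pvCands (path : String) : List String :=
  ((PySem.List.enumerate path.toList).filterMap
     (fun p => if p.2 == '/' then some (PySem.Str.slice path none (some p.1)) else none)) ++ [path]

theorem pv_mem_pvCands_iff (path st : String) :
    st ∈ pvCands path ↔
      ((∃ p ∈ PySem.List.enumerate path.toList 0,
          (p.2 == '/') = true ∧ PySem.Str.slice path none (some p.1) = st) ∨ st = path) := by
  simp only [pvCands, List.mem_append, List.mem_filterMap, List.mem_singleton]
  apply or_congr _ Iff.rfl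
  constructor
  · rintro ⟨p, hp, hf⟩
    by_cases h : (p.2 == '/') = true
    · exact ⟨p, hp, h, by simpa [h] using hf⟩
    · simp [h] at hf
  · rintro ⟨p, hp, h, hs⟩
    exact ⟨p, hp, by simp [h, hs]⟩

-- A's match condition is exactly membership in pvCands
theorem pv_match_iff (path st : String) :
    (PySem.Str.startswith path (st ++ "/") || path == st) = true ↔ st ∈ pvCands path := by
  rw [pv_mem_pvCands_iff, Bool.or_eq_true, beq_iff_eq,
    PySem.Str.startswith_eq, PySem.Chars.startswith_iff]
  constructor
  · rintro (⟨t, ht⟩ | h)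
    · left
      simp only [String.toList_append] at ht
      have hlist : st.toList ++ '/' :: t = path.toList := by simpa using ht
      set j := st.toList.length with hj
      have hjl : j < path.toList.length := by
        rw [← hlist]; simp [hj]
      have hget : path.toList[j]'hjl = '/' := by
        have h2 : (st.toList ++ '/' :: t)[j]'(by simp [hj]) = '/' := by
          simp [hj]
        simpa [hlist] using h2
      refine ⟨((j : Int), '/'), ?_, by simp, ?_⟩
      · rw [PySem.List.mem_enumerate_iff]
        refine ⟨j, hjl, ?_⟩
        simp [hget]
      · apply String.toList_injective
        rw [PySem.Str.toList_slice, PySem.Chars.slice_eq_listSlice,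
          PySem.List.slice_to _ (by positivity)]
        simp only [Int.toNat_natCast]
        rw [← hlist]
        simp [hj]
    · right; exact h.symm
  · rintro (⟨p, hp, hslash, hslice⟩ | h)
    · left
      rw [PySem.List.mem_enumerate_iff] at hp
      obtain ⟨k, hk, rfl⟩ := hp
      simp only [beq_iff_eq] at hslash
      have hst : st.toList = path.toList.take k := by
        rw [← hslice, PySem.Str.toList_slice, PySem.Chars.slice_eq_listSlice]
        rw [show ((0:Int) + (k:Int)) = (k:Int) by ring, PySem.List.slice_to _ (by positivity)]
        simp
      refine ⟨path.toList.drop (k+1), ?_⟩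
      simp only [String.toList_append]
      calc st.toList ++ "/".toList ++ path.toList.drop (k+1)
          = path.toList.take k ++ [path.toList[k]] ++ path.toList.drop (k+1) := by
            rw [hst]; simp [hslash]
          _ = path.toList.take (k+1) ++ path.toList.drop (k+1) := by
            rw [List.take_add_one, List.getElem?_eq_getElem hk]; rfl
          _ = path.toList := List.take_append_drop _ _
    · exact Or.inr h.symm

-- B's order dict: spec of the first-occurrence index fold
theorem pv_order_fold_get? (l : List String) (s : Int) (d : PySem.Dict String Int)
    (hnd : l.Nodup) (hd : ∀ k ∈ l, d.contains k = false) (k : String) :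
    ((PySem.List.enumerate l s).foldl
        (fun d p => if d.contains p.2 then d else d.insert p.2 p.1) d).get? k
      = if k ∈ l then some (s + (l.idxOf k : Int)) else d.get? k := by
  induction l generalizing s d with
  | nil => simp [PySem.List.enumerate_nil]
  | cons x xs ih =>
    rw [PySem.List.enumerate_cons]
    simp only [List.foldl_cons]
    have hx : d.contains x = false := hd x List.mem_cons_self
    rw [hx]
    simp only [Bool.false_eq_true, if_false]
    have hd' : ∀ k' ∈ xs, (d.insert x s).contains k' = false := by
      intro k' hk'
      rw [PySem.Dict.contains_insert]
      have hne : k' ≠ x := by rintro rfl; exact (List.nodup_cons.mp hnd).1 hk'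
      simp [hne, hd k' (List.mem_cons_of_mem x hk')]
    rw [ih (s+1) (d.insert x s) (List.nodup_cons.mp hnd).2 hd']
    by_cases hkx : k = x
    · subst hkx
      have : k ∉ xs := (List.nodup_cons.mp hnd).1
      simp [this]
    · by_cases hkxs : k ∈ xs
      · simp only [hkxs, if_true, List.mem_cons, hkx, false_or]
        rw [List.idxOf_cons]
        rw [show (x == k) = false by simp [Ne.symm hkx]]
        simp only [Bool.cond_false]
        congr 1
        push_cast
        ring
      · simp [hkxs, hkx, PySem.Dict.get?_insert]

theorem pv_order_get? (m : List (String × String)) (k : String) :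
    (pvOrder m).get? k =
      if k ∈ (PySem.Dict.ofList m).keys
      then some (((PySem.Dict.ofList m).keys.idxOf k : Int)) else none := by
  have h := pv_order_fold_get? (PySem.Dict.ofList m).keys 0 PySem.Dict.empty
    (PySem.Dict.nodup_keys_ofList m) (by intro k _; simp [pysem]) k
  simpa [pvOrder, PySem.Dict.get?_empty] using h

theorem pv_order_contains (m : List (String × String)) (k : String) :
    (pvOrder m).contains k = decide (k ∈ (PySem.Dict.ofList m).keys) := by
  rw [PySem.Dict.contains_eq_isSome_get?, pv_order_get? m k]
  by_cases h : k ∈ (PySem.Dict.ofList m).keys <;> simp [h]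

theorem pv_order_getD (m : List (String × String)) (k : String)
    (hk : k ∈ (PySem.Dict.ofList m).keys) :
    (pvOrder m).getD k 0 = ((PySem.Dict.ofList m).keys.idxOf k : Int) := by
  show ((pvOrder m).get? k).getD 0 = _
  rw [pv_order_get? m k]; simp [hk]

-- fold over pvBestStep: the result is the member of cs ∩ keys with least key index
theorem pv_fold_spec (m : List (String × String)) (cs : List String) (best : Option String)
    (hb : ∀ b, best = some b → b ∈ (PySem.Dict.ofList m).keys) :
    (cs.foldl (pvBestStep (pvOrder m)) best = none → best = none ∧ ∀ c ∈ cs, c ∉ (PySem.Dict.ofList m).keys)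
    ∧ (∀ b, cs.foldl (pvBestStep (pvOrder m)) best = some b →
        b ∈ (PySem.Dict.ofList m).keys ∧ (b ∈ cs ∨ best = some b)
        ∧ (∀ c ∈ cs, c ∈ (PySem.Dict.ofList m).keys →
            (PySem.Dict.ofList m).keys.idxOf b ≤ (PySem.Dict.ofList m).keys.idxOf c)
        ∧ (∀ b0, best = some b0 →
            (PySem.Dict.ofList m).keys.idxOf b ≤ (PySem.Dict.ofList m).keys.idxOf b0)) := by
  induction cs generalizing best with
  | nil =>
    refine ⟨fun h => ⟨h, by simp⟩, fun b h => ⟨hb b h, Or.inr h, by simp, ?_⟩⟩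
    rintro b0 rfl
    cases h; exact le_refl _
  | cons c cs ih =>
    simp only [List.foldl_cons]
    by_cases hc : c ∈ (PySem.Dict.ofList m).keys
    · cases hbest : best with
      | none =>
        have hstep : pvBestStep (pvOrder m) none c = some c := by
          unfold pvBestStep; rw [pv_order_contains]; simp [hc]
        rw [hstep]
        have ihc := ih (some c) (by rintro b h; cases h; exact hc)
        refine ⟨fun h => absurd (ihc.1 h).1 (by simp), fun b h => ?_⟩
        obtain ⟨hbk, hmem, hmin, hacc⟩ := ihc.2 b h
        refine ⟨hbk, ?_, ?_, by rintro b0 ⟨⟩⟩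
        · rcases hmem with hm | hm
          · exact Or.inl (List.mem_cons_of_mem c hm)
          · cases hm; exact Or.inl List.mem_cons_self
        · intro c' hc' hc'k
          rcases List.mem_cons.mp hc' with rfl | hm
          · exact hacc c' rfl
          · exact hmin c' hm hc'k
      | some b0 =>
        have hb0k : b0 ∈ (PySem.Dict.ofList m).keys := hb b0 hbest
        have hstep : pvBestStep (pvOrder m) (some b0) c =
            if List.idxOf c (PySem.Dict.ofList m).keys < List.idxOf b0 (PySem.Dict.ofList m).keys
            then some c else some b0 := by
          unfold pvBestStep; rw [pv_order_contains]
          simp only [hc, decide_true, if_true]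
          rw [pv_order_getD m c hc, pv_order_getD m b0 hb0k]
          simp [Nat.cast_lt]
        by_cases hlt : List.idxOf c (PySem.Dict.ofList m).keys < List.idxOf b0 (PySem.Dict.ofList m).keys
        · rw [hstep, if_pos hlt]
          have ihc := ih (some c) (by rintro b h; cases h; exact hc)
          refine ⟨fun h => absurd (ihc.1 h).1 (by simp), fun b h => ?_⟩
          obtain ⟨hbk, hmem, hmin, hacc⟩ := ihc.2 b h
          have hbc : List.idxOf b (PySem.Dict.ofList m).keys ≤ List.idxOf c (PySem.Dict.ofList m).keys :=
            hacc c rfl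
          refine ⟨hbk, ?_, ?_, ?_⟩
          · rcases hmem with hm | hm
            · exact Or.inl (List.mem_cons_of_mem c hm)
            · cases hm; exact Or.inl List.mem_cons_self
          · intro c' hc' hc'k
            rcases List.mem_cons.mp hc' with rfl | hm
            · exact hbc
            · exact hmin c' hm hc'k
          · intro b1 h1; cases h1
            exact le_of_lt (lt_of_le_of_lt hbc hlt)
        · rw [hstep, if_neg hlt]
          have ihc := ih (some b0) (by rintro b h; cases h; exact hb0k)
          refine ⟨fun h => absurd (ihc.1 h).1 (by simp), fun b h => ?_⟩
          obtain ⟨hbk, hmem, hmin, hacc⟩ := ihc.2 b h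
          have hbb0 : List.idxOf b (PySem.Dict.ofList m).keys ≤ List.idxOf b0 (PySem.Dict.ofList m).keys :=
            hacc b0 rfl
          refine ⟨hbk, ?_, ?_, by intro b1 h1; cases h1; exact hbb0⟩
          · rcases hmem with hm | hm
            · exact Or.inl (List.mem_cons_of_mem c hm)
            · exact Or.inr hm
          · intro c' hc' hc'k
            rcases List.mem_cons.mp hc' with rfl | hm
            · exact le_trans hbb0 (le_of_not_gt hlt)
            · exact hmin c' hm hc'k
    · have hstep : pvBestStep (pvOrder m) best c = best := by
        unfold pvBestStep
        rw [pv_order_contains]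
        simp [hc]
      rw [hstep]
      have ihc := ih best hb
      refine ⟨fun h => ?_, fun b h => ?_⟩
      · obtain ⟨h1, h2⟩ := ihc.1 h
        refine ⟨h1, ?_⟩
        intro c' hc'
        rcases List.mem_cons.mp hc' with rfl | hm
        · exact hc
        · exact h2 c' hm
      · obtain ⟨hbk, hmem, hmin, hacc⟩ := ihc.2 b h
        refine ⟨hbk, ?_, ?_, hacc⟩
        · rcases hmem with hm | hm
          · exact Or.inl (List.mem_cons_of_mem c hm)
          · exact Or.inr hm
        · intro c' hc' hc'k
          rcases List.mem_cons.mp hc' with rfl | hm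
          · exact absurd hc'k hc
          · exact hmin c' hm hc'k

theorem pv_find?_congr {α : Type} (p q : α → Bool) (l : List α) (h : ∀ x ∈ l, p x = q x) :
    l.find? p = l.find? q := by
  induction l with
  | nil => rfl
  | cons x xs ih =>
    simp only [List.find?]
    rw [h x List.mem_cons_self, ih (fun y hy => h y (List.mem_cons_of_mem x hy))]

-- per-path: A's first-match scan over the keys equals B's best-candidate fold
theorem pv_per_path (m : List (String × String)) (path : String) :
    (PySem.Dict.ofList m).keys.find?
        (fun subtree => PySem.Str.startswith path (subtree ++ "/") || path == subtree)
      = (pvCands path).foldl (pvBestStep (pvOrder m)) none := by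
  rw [pv_find?_congr _ (fun st => decide (st ∈ pvCands path)) _
    (fun st _ => by rw [Bool.eq_iff_iff, decide_eq_true_iff]; exact pv_match_iff path st)]
  have hspec := pv_fold_spec m (pvCands path) none (by rintro b ⟨⟩)
  cases hA : (PySem.Dict.ofList m).keys.find? (fun st => decide (st ∈ pvCands path)) with
  | none =>
    rw [List.find?_eq_none] at hA
    cases hB : (pvCands path).foldl (pvBestStep (pvOrder m)) none with
    | none => rfl
    | some b =>
      obtain ⟨hbk, hmem, -, -⟩ := hspec.2 b hB
      rcases hmem with hm | hm
      · exact absurd (by simpa using hA b hbk) (by simp [hm])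
      · cases hm
  | some k =>
    rw [List.find?_eq_some_iff_append] at hA
    obtain ⟨hk_cands, as, bs, hks, has⟩ := hA
    have hk_cands' : k ∈ pvCands path := by simpa using hk_cands
    have hk_ks : k ∈ (PySem.Dict.ofList m).keys := by rw [hks]; simp
    have hk_nas : k ∉ as := by
      intro hmem
      have := has k hmem
      simp [hk_cands'] at this
    have hidx_k : (PySem.Dict.ofList m).keys.idxOf k = as.length := by
      rw [hks, List.idxOf_append, if_neg hk_nas]
      simp
    have hmin_k : ∀ k' ∈ (PySem.Dict.ofList m).keys, k' ∈ pvCands path →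
        (PySem.Dict.ofList m).keys.idxOf k ≤ (PySem.Dict.ofList m).keys.idxOf k' := by
      intro k' _ hk'c
      have hk'nas : k' ∉ as := by
        intro hmem
        have := has k' hmem
        simp [hk'c] at this
      rw [hidx_k, hks, List.idxOf_append, if_neg hk'nas]
      omega
    cases hB : (pvCands path).foldl (pvBestStep (pvOrder m)) none with
    | none =>
      obtain ⟨-, hall⟩ := hspec.1 hB
      exact absurd hk_ks (hall k hk_cands')
    | some b =>
      obtain ⟨hbk, hmem, hmin, -⟩ := hspec.2 b hB
      have hbc : b ∈ pvCands path := by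
        rcases hmem with hm | hm
        · exact hm
        · cases hm
      have h1 := hmin k hk_cands' hk_ks
      have h2 := hmin_k b hbk hbc
      have heq : (PySem.Dict.ofList m).keys.idxOf k = (PySem.Dict.ofList m).keys.idxOf b :=
        le_antisymm h2 h1
      have hklt : (PySem.Dict.ofList m).keys.idxOf k < (PySem.Dict.ofList m).keys.length :=
        List.idxOf_lt_length_iff.mpr hk_ks
      have hblt : (PySem.Dict.ofList m).keys.idxOf b < (PySem.Dict.ofList m).keys.length :=
        List.idxOf_lt_length_iff.mpr hbk
      have hkb : k = b := by
        conv_lhs => rw [← List.getElem_idxOf hklt]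
        conv_rhs => rw [← List.getElem_idxOf hblt]
        congr 1
      rw [hkb]

-- B's inner fold over the path's characters, plus the final whole-path step, = fold over pvCands
theorem pv_inner_fold (m : List (String × String)) (path : String) :
    pvBestStep (pvOrder m)
        ((PySem.List.enumerate path.toList).foldl
          (fun best p =>
            if p.2 == '/' then pvBestStep (pvOrder m) best (PySem.Str.slice path none (some p.1))
            else best) none)
        path
      = (pvCands path).foldl (pvBestStep (pvOrder m)) none := by
  rw [pvCands, List.foldl_append, List.foldl_filterMap]
  simp only [List.foldl_cons, List.foldl_nil]
  congr 1
  apply List.foldl_ext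
  intro b p _
  by_cases h : (p.2 == '/') = true <;> simp [h]

-- ===== VERDICT (by name: the statement is the Claim_ definition above) =====
theorem get_changed_subtrees_spec : Claim_equal_get_changed_subtrees := by
  intro mp m _
  show get_changed_subtrees mp m = get_changed_subtrees_alt mp m
  unfold get_changed_subtrees get_changed_subtrees_alt
  apply List.foldl_ext
  intro acc path _
  simp only []
  rw [pv_per_path m path, pv_inner_fold m path]
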